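-- pv_equiv track=rewrite | github.com/CaioGMorata/Colheita | Backend/Hello_Flask/app.py | check_consecutive_positions
-- ===== SOURCE A (Python) =====
-- def check_consecutive_positions(m_length, m_record_index_list, m_left):
--     count=0
--     length = m_length
--     while (m_length != 0):
--         if ((m_left-m_length+1) not in m_record_index_list):  #Verifica as posições anteriores do vetor
--             count+=1
--         m_length = m_length - 1
--
--     m_length = length
--     if (count == length):
--         return True
--     return False
-- ===== SOURCE B (Python) =====
-- def check_consecutive_positions(m_length, m_record_index_list, m_left):
--     lo = m_left - m_length + 1
--     return all(not (lo <= x <= m_left) for x in m_record_index_list)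
-- ===== Notes on version B (the rewrite author's own statement) =====
-- stated objective: simpler
-- what changed: Drops the count-down while loop, the count accumulator and the count==length test: B computes the interval of prior positions and makes one pass over the record list checking that no record falls inside it.
import Mathlib
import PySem

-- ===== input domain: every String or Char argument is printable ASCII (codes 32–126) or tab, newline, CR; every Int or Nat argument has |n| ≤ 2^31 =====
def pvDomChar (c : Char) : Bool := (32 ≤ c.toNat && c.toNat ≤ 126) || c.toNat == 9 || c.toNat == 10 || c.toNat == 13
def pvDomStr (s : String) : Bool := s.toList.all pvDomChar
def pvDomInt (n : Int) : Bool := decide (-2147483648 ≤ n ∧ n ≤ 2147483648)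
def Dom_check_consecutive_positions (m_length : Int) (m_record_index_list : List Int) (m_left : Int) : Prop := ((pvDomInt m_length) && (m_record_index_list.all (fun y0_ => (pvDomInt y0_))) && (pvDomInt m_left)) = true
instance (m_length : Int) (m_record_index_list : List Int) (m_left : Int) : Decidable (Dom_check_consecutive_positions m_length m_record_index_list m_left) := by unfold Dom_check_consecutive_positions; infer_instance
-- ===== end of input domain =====

-- B drops A's count-down while loop, count accumulator and count==length test: it makes
-- one pass over the record list checking no record lies in the interval of prior positions; objective: simpler.


-- ===== PORT A =====
-- the while loop: state (m_length, count); the 'm ≤ 0' guard only makes the recursion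
-- total (Python tests 'm_length != 0' and diverges for negative m_length, excluded by Pre_)
def pvALoop (m : Int) (lst : List Int) (left : Int) (count : Int) : Int :=
  if _h : m ≤ 0 then count
  else pvALoop (m - 1) lst left (if (left - m + 1) ∈ lst then count else count + 1)
termination_by m.toNat
decreasing_by omega

def check_consecutive_positions (m_length : Int) (m_record_index_list : List Int) (m_left : Int) : Bool :=
  let count := pvALoop m_length m_record_index_list m_left 0
  if count = m_length then true else false

-- ===== PORT B =====
def check_consecutive_positions_alt (m_length : Int) (m_record_index_list : List Int) (m_left : Int) : Bool :=
  let lo := m_left - m_length + 1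
  m_record_index_list.all (fun x => !(decide (lo ≤ x ∧ x ≤ m_left)))

-- ===== PRECONDITION & SPEC =====
-- Pre_ excludes negative m_length, on which A's while loop never terminates (it decrements past 0).
def Pre_check_consecutive_positions (m_length : Int) (m_record_index_list : List Int) (m_left : Int) : Prop := 0 ≤ m_length
instance (m_length : Int) (m_record_index_list : List Int) (m_left : Int) : Decidable (Pre_check_consecutive_positions m_length m_record_index_list m_left) := by unfold Pre_check_consecutive_positions; infer_instance
def pvWitness_check_consecutive_positions : Int × List Int × Int := (3, [9], 10)

def Spec_check_consecutive_positions (m_length : Int) (m_record_index_list : List Int) (m_left : Int) (out : Bool) : Prop := out = check_consecutive_positions_alt m_length m_record_index_list m_left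
instance (m_length : Int) (m_record_index_list : List Int) (m_left : Int) (out : Bool) : Decidable (Spec_check_consecutive_positions m_length m_record_index_list m_left out) := by unfold Spec_check_consecutive_positions; infer_instance

-- ===== CLAIM (what is proved, stated in full; the proofs are below) =====
def Claim_equal_check_consecutive_positions : Prop := ∀ (m_length : Int) (m_record_index_list : List Int) (m_left : Int), Dom_check_consecutive_positions m_length m_record_index_list m_left → Pre_check_consecutive_positions m_length m_record_index_list m_left → Spec_check_consecutive_positions m_length m_record_index_list m_left (check_consecutive_positions m_length m_record_index_list m_left)

-- ===== LEMMAS AND PROOFS =====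

-- the number of absent prior positions among the first n steps, as A counts them
def pvCnt (lst : List Int) (left : Int) : Nat → Int
  | 0 => 0
  | n + 1 => (if left - (n : Int) ∈ lst then 0 else 1) + pvCnt lst left n

theorem pvALoop_eq_cnt (lst : List Int) (left : Int) : ∀ (n : Nat) (c : Int),
    pvALoop (n : Int) lst left c = c + pvCnt lst left n := by
  intro n
  induction n with
  | zero => intro c; simp [pvALoop, pvCnt]
  | succ k ih =>
    intro c
    have hg : ¬ (((k + 1 : Nat) : Int) ≤ 0) := by push_cast; omega
    rw [pvALoop, dif_neg hg]
    have h2 : ((k + 1 : Nat) : Int) - 1 = (k : Int) := by push_cast; ring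
    have h3 : left - ((k + 1 : Nat) : Int) + 1 = left - (k : Int) := by push_cast; ring
    rw [h2, h3]
    simp only [pvCnt]
    split_ifs with hmem
    · rw [ih]; omega
    · rw [ih]; omega

theorem pvCnt_le (lst : List Int) (left : Int) (n : Nat) : pvCnt lst left n ≤ (n : Int) := by
  induction n with
  | zero => simp [pvCnt]
  | succ k ih => simp only [pvCnt]; split_ifs <;> push_cast <;> omega

theorem pvCnt_eq_iff (lst : List Int) (left : Int) (n : Nat) :
    pvCnt lst left n = (n : Int) ↔ ∀ k : Nat, k < n → left - (k : Int) ∉ lst := by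
  induction n with
  | zero => simp [pvCnt]
  | succ k ih =>
    simp only [pvCnt]
    have hle := pvCnt_le lst left k
    constructor
    · intro h j hj
      have hone : left - (k : Int) ∉ lst := by
        intro hmem
        rw [if_pos hmem] at h
        push_cast at h
        omega
      rw [if_neg hone] at h
      have hc : pvCnt lst left k = (k : Int) := by push_cast at h; omega
      rcases Nat.lt_succ_iff_lt_or_eq.mp hj with hlt | heq
      · exact (ih.mp hc) j hlt
      · subst heq; exact hone
    · intro h
      have h1 : left - (k : Int) ∉ lst := h k (Nat.lt_succ_self k)
      have h2 : pvCnt lst left k = (k : Int) := ih.mpr (fun j hj => h j (Nat.lt_succ_of_lt hj))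
      rw [if_neg h1, h2]
      push_cast
      ring

theorem check_consecutive_positions_spec : Claim_equal_check_consecutive_positions := by
  intro m lst left _hdom hpre
  unfold Spec_check_consecutive_positions check_consecutive_positions check_consecutive_positions_alt
  have hn : m = ((m.toNat : Nat) : Int) := by
    unfold Pre_check_consecutive_positions at hpre; omega
  set n := m.toNat with hn'
  rw [Bool.eq_iff_iff]
  rw [hn, pvALoop_eq_cnt]
  simp only [zero_add, List.all_eq_true, Bool.not_eq_true', decide_eq_false_iff_not]
  constructor
  · intro hA
    have hcnt : pvCnt lst left n = (n : Int) := by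
      by_contra hne
      simp [hne] at hA
    have habs := (pvCnt_eq_iff lst left n).mp hcnt
    intro x hx hint
    obtain ⟨h1, h2⟩ := hint
    have hk1 : (left - x).toNat < n := by omega
    have hk2 : x = left - (((left - x).toNat : Nat) : Int) := by omega
    exact habs (left - x).toNat hk1 (hk2 ▸ hx)
  · intro hB
    have hcnt : pvCnt lst left n = (n : Int) := by
      rw [pvCnt_eq_iff]
      intro k hk hmem
      exact hB _ hmem ⟨by omega, by omega⟩
    simp [hcnt]
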